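-- pv_equiv track=rewrite | github.com/133794m3r/python_numsworks | crypto.py | ip2os
-- ===== SOURCE A (Python) =====
-- def ip2os(x:int,x_len:int)->str:
-- 	if x >= (1<<(8*x_len)):
-- 		raise ValueError("Number is too large to fit in a string of that length")
-- 	X = []
-- 	os = ''
-- 	while x>0:
-- 		X.append(x % 256)
-- 		x >>= 8
-- 	X+=([0]*(x_len-len(X)))
-- 	X=X[::-1]
-- 	for item in X:
-- 		os+=chr(item)
--
-- 	return os
-- ===== SOURCE B (Python) =====
-- def ip2os(x: int, x_len: int) -> str:
--     if x >= (1 << (8 * x_len)):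
--         raise ValueError("Number is too large to fit in a string of that length")
--     v = max(x, 0)  # non-positive inputs encode as x_len zero chars
--     return ''.join(chr((v >> (8 * (x_len - 1 - i))) & 0xff) for i in range(x_len))
-- ===== Notes on version B (the rewrite author's own statement) =====
-- stated objective: simpler
-- what changed: Replaces the little-endian append/zero-pad/reverse/concatenate pipeline with a single big-endian positional pass: each output char is extracted directly by shift-and-mask and the chars are joined once.
import Mathlib
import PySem

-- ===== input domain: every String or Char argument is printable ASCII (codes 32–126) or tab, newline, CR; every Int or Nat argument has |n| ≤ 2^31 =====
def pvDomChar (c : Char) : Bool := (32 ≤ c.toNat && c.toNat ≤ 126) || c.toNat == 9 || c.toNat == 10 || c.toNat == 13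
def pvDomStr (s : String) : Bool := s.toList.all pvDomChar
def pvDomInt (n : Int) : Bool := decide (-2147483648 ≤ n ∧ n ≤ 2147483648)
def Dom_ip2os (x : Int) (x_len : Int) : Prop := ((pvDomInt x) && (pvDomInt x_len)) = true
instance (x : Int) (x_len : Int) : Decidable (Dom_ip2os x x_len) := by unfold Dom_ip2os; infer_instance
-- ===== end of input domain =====

-- B replaces A's little-endian append/pad/reverse pipeline by one big-endian
-- shift-and-mask pass per output position (objective: simpler).

-- ===== PORT A =====
-- the 'while x > 0: X.append(x % 256); x >>= 8' loop
def ip2osBytes (x : Int) : List Int :=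
  if _h : x > 0 then PySem.Int.mod x 256 :: ip2osBytes (x >>> (8 : Nat)) else []
termination_by x.toNat
decreasing_by
  rw [Int.shiftRight_eq_div_pow]
  omega

def ip2os (x : Int) (x_len : Int) : String :=
  let X := ip2osBytes x
  -- X += [0]*(x_len-len(X)): Python repeats a list max(n,0) times, which is Int.toNat
  let Xp := X ++ List.replicate (x_len - (X.length : Int)).toNat 0
  let Xr := Xp.reverse
  -- 'os += chr(item)' accumulates chars; built on List Char (Lean's String.append is opaque)
  String.ofList (Xr.foldl (fun os item => os ++ [Char.ofNat item.toNat]) [])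

-- ===== PORT B =====
def ip2os_alt (x : Int) (x_len : Int) : String :=
  let v := max x 0
  -- shift amount 8*(x_len-1-i) is ≥ 0 for i ∈ range(x_len), so .toNat is exact
  String.ofList ((PySem.List.pyRange 0 x_len 1).map
    (fun i => Char.ofNat (PySem.Int.band (v >>> (8 * (x_len - 1 - i)).toNat) 255).toNat))

-- ===== PRECONDITION & SPEC =====
-- Pre_ excludes exactly the inputs where A raises ValueError: a negative x_len
-- (negative shift count) or x too large for x_len bytes.
def Pre_ip2os (x : Int) (x_len : Int) : Prop :=
  0 ≤ x_len ∧ (x ≤ 0 ∨ (PySem.Int.bitLength x : Int) ≤ 8 * x_len)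
instance (x : Int) (x_len : Int) : Decidable (Pre_ip2os x x_len) := by unfold Pre_ip2os; infer_instance
def pvWitness_ip2os : Int × Int := (258, 4)

def Spec_ip2os (x : Int) (x_len : Int) (out : String) : Prop := out = ip2os_alt x x_len
instance (x : Int) (x_len : Int) (out : String) : Decidable (Spec_ip2os x x_len out) := by unfold Spec_ip2os; infer_instance

-- ===== CLAIM (what is proved, stated in full; the proofs are below) =====
def Claim_equal_ip2os : Prop := ∀ (x : Int) (x_len : Int), Dom_ip2os x x_len → Pre_ip2os x x_len → Spec_ip2os x x_len (ip2os x x_len)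

-- ===== LEMMAS AND PROOFS =====

theorem ip2osBytes_of_nonpos {x : Int} (h : ¬ x > 0) : ip2osBytes x = [] := by
  rw [ip2osBytes]; simp [h]

theorem ip2osBytes_of_pos {x : Int} (h : x > 0) :
    ip2osBytes x = PySem.Int.mod x 256 :: ip2osBytes (x >>> (8 : Nat)) := by
  rw [ip2osBytes]; simp [h]

-- A's padded little-endian byte list is position-indexed division/mod
theorem bytes_pad_eq (n : Nat) : ∀ (x : Int), x < 256 ^ n →
    ip2osBytes x ++ List.replicate (n - (ip2osBytes x).length) 0
      = (List.range n).map (fun i => max x 0 / 256 ^ i % 256) := by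
  induction n with
  | zero =>
    intro x hx
    have : ¬ x > 0 := by omega
    simp [ip2osBytes_of_nonpos this]
  | succ n ih =>
    intro x hx
    by_cases hpos : x > 0
    · rw [ip2osBytes_of_pos hpos]
      have hsh : x >>> (8 : Nat) = x / 256 := by
        rw [Int.shiftRight_eq_div_pow]; norm_num
      have hmod : PySem.Int.mod x 256 = x % 256 :=
        PySem.Int.mod_eq_emod_of_pos (by omega)
      have hlt : x / 256 < 256 ^ n := by
        rw [Int.ediv_lt_iff_lt_mul (by omega)]
        calc x < 256 ^ (n + 1) := hx
        _ = 256 ^ n * 256 := by ring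
      have hstep := ih (x / 256) (by rw [← hsh]; rw [hsh]; exact hlt)
      rw [hsh]
      simp only [List.length_cons, List.cons_append]
      have hpad : n + 1 - ((ip2osBytes (x / 256)).length + 1)
          = n - (ip2osBytes (x / 256)).length := by omega
      rw [hpad, hstep, List.range_succ_eq_map]
      simp only [List.map_cons, List.map_map]
      have hx0 : max x 0 = x := by omega
      have hq0 : max (x / 256) 0 = x / 256 := by
        have : (0:Int) ≤ x / 256 := Int.ediv_nonneg (by omega) (by omega)
        omega
      congr 1
      · simp [hx0]
      · apply List.map_congr_left
        intro i _
        simp only [Function.comp, hx0, hq0]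
        congr 1
        rw [Int.ediv_ediv_of_nonneg (by norm_num : (0:Int) ≤ 256)]
        congr 1
        rw [pow_succ]; ring
    · rw [ip2osBytes_of_nonpos hpos]
      have hm : max x 0 = 0 := by omega
      simp [hm]

-- (map g (range n)).reverse indexed from the top
theorem reverse_map_range {α : Type} (g : Nat → α) : ∀ (n : Nat),
    (List.map g (List.range n)).reverse = List.map (fun i => g (n - 1 - i)) (List.range n) := by
  intro n
  apply List.ext_getElem (by simp)
  intro i h1 h2
  simp [List.getElem_reverse]

theorem int_band_255 {a : Int} (ha : 0 ≤ a) :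
    PySem.Int.band a 255 = a % 256 := by
  rw [PySem.Int.band_of_nonneg ha (by norm_num)]
  have : (255 : Int).toNat = 255 := by decide
  rw [this, Nat.and_two_pow_sub_one_eq_mod a.toNat 8]
  omega

-- ===== VERDICT (by name: the statement is the Claim_ definition above) =====
theorem ip2os_spec : Claim_equal_ip2os := by
  intro x x_len _ hpre
  obtain ⟨hlen, hx⟩ := hpre
  unfold Spec_ip2os ip2os ip2os_alt
  set n := x_len.toNat with hn
  have hxlen : x_len = (n : Int) := by omega
  have h256 : x < 256 ^ n := by
    rcases hx with hx | hx
    · calc x ≤ 0 := hx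
      _ < 256 ^ n := by positivity
    · have hb : PySem.Int.bitLength x ≤ 8 * n := by omega
      have h1 : x.natAbs < 2 ^ PySem.Int.bitLength x := PySem.Int.lt_two_pow_bitLength x
      have h2 : (2:Nat) ^ PySem.Int.bitLength x ≤ 2 ^ (8 * n) := Nat.pow_le_pow_right (by omega) hb
      have h3 : x.natAbs < 2 ^ (8 * n) := lt_of_lt_of_le h1 h2
      have h4 : x ≤ (x.natAbs : Int) := Int.le_natAbs
      calc x ≤ (x.natAbs : Int) := h4
      _ < ((2 ^ (8 * n) : Nat) : Int) := by exact_mod_cast h3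
      _ = 256 ^ n := by push_cast; rw [pow_mul]; norm_num
  have hpadlen : (x_len - ((ip2osBytes x).length : Int)).toNat
      = n - (ip2osBytes x).length := by omega
  simp only [hpadlen]
  rw [bytes_pad_eq n x h256]
  rw [PySem.List.foldl_append_singleton_eq_map, List.nil_append]
  rw [reverse_map_range, List.map_map]
  rw [hxlen, PySem.List.pyRange_one]
  simp only [sub_zero, Int.toNat_natCast, List.map_map]
  congr 1
  apply List.map_congr_left
  intro i hi
  rw [List.mem_range] at hi
  simp only [Function.comp]
  have hsh : ((8 : Int) * ((n : Int) - 1 - (0 + (i : Int)))).toNat = 8 * (n - 1 - i) := by omega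
  rw [hsh, Int.shiftRight_eq_div_pow]
  have hv : (0:Int) ≤ max x 0 := le_max_right _ _
  have hdiv_nonneg : (0:Int) ≤ max x 0 / ((2:Nat) ^ (8 * (n - 1 - i)) : Nat) := by
    apply Int.ediv_nonneg hv (by positivity)
  rw [int_band_255 hdiv_nonneg]
  congr 1
  have : ((2 ^ (8 * (n - 1 - i)) : Nat) : Int) = 256 ^ (n - 1 - i) := by
    push_cast; rw [pow_mul]; norm_num
  rw [this]
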